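-- pv_equiv track=rewrite | github.com/antenore/voynich-toolkit | src/voynich_toolkit/anchor_words.py | hebrew_to_consonantal
-- ===== SOURCE A (Python) =====
-- def hebrew_to_consonantal(translit):
--     """Convert romanized Hebrew to consonantal ASCII.
--
--     Uses digraph-first parsing. Vowels map to matres lectionis
--     only where conventional (i→y, o/u→w); short vowels dropped.
--     """
--     w = translit.lower().replace("'", "").replace("-", "")
--     result = []
--     i = 0
--     n = len(w)
--     while i < n:
--         if i + 1 < n:
--             di = w[i:i + 2]
--             if di == "sh":
--                 result.append("S"); i += 2; continue
--             if di in ("ch", "kh"):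
--                 result.append("X"); i += 2; continue
--             if di in ("tz", "ts"):
--                 result.append("C"); i += 2; continue
--             if di == "th":
--                 result.append("t"); i += 2; continue
--             if di == "ph":
--                 result.append("p"); i += 2; continue
--         c = w[i]
--         CONS = {
--             "b": "b", "g": "g", "d": "d", "h": "h", "v": "b",
--             "w": "w", "z": "z", "y": "y", "k": "k", "l": "l",
--             "m": "m", "n": "n", "s": "s", "p": "p", "f": "p",
--             "r": "r", "t": "t", "q": "q",
--         }
--         if c in CONS:
--             result.append(CONS[c])
--         elif c == "i":
--             result.append("y")
--         elif c in "ou":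
--             result.append("w")
--         elif c == "a":
--             if i == 0:
--                 result.append("A")
--         # 'e' at end → he
--         elif c == "e":
--             if i == n - 1:
--                 result.append("h")
--         i += 1
--     return "".join(result)
-- ===== SOURCE B (Python) =====
-- import re
--
-- _TOK = re.compile(r"sh|ch|kh|tz|ts|th|ph|.", re.DOTALL)
--
-- _DI = {"sh": "S", "ch": "X", "kh": "X", "tz": "C", "ts": "C", "th": "t", "ph": "p"}
--
-- _CONS = {
--     "b": "b", "g": "g", "d": "d", "h": "h", "v": "b",
--     "w": "w", "z": "z", "y": "y", "k": "k", "l": "l",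
--     "m": "m", "n": "n", "s": "s", "p": "p", "f": "p",
--     "r": "r", "t": "t", "q": "q",
-- }
--
--
-- def hebrew_to_consonantal(translit):
--     """Convert romanized Hebrew to consonantal ASCII (tokenize-then-map)."""
--     w = translit.lower().replace("'", "").replace("-", "")
--     toks = _TOK.findall(w)
--     last = len(toks) - 1
--     out = []
--     for i, t in enumerate(toks):
--         if t in _DI:
--             out.append(_DI[t])
--         elif t in _CONS:
--             out.append(_CONS[t])
--         elif t == "i":
--             out.append("y")
--         elif t in ("o", "u"):
--             out.append("w")
--         elif t == "a" and i == 0: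
--             out.append("A")
--         elif t == "e" and i == last:
--             out.append("h")
--     return "".join(out)
-- ===== Notes on version B (the rewrite author's own statement) =====
-- stated objective: idiomatic
-- what changed: Replaces the hand-rolled index loop with consume-2-or-1 continues by a two-phase pipeline: a greedy regex tokenizer (digraph-or-any-char) followed by a positional per-token mapping over enumerate, with the digraph and consonant tables hoisted to module level.
import Mathlib
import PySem

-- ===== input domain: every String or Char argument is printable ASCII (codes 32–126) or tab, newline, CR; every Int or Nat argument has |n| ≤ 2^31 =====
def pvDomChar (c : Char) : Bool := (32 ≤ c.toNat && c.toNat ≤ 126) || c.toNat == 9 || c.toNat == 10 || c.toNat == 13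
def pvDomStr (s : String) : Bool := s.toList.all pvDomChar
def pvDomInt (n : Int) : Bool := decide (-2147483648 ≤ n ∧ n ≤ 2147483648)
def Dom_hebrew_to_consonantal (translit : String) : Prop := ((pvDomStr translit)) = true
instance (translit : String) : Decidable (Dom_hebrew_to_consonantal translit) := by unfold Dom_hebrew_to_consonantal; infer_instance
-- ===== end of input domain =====

-- B re-implements A's index-loop as tokenize-then-map (regex digraph-or-char tokens,
-- then a positional per-token mapping); objective: idiomatic, same exact output.

-- ===== PORT A =====
-- A's dict literal CONS (built inside the loop body; constant, so defined once here)
def aCONS : PySem.Dict Char Char := ⟨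
  [('b','b'),('g','g'),('d','d'),('h','h'),('v','b'),
   ('w','w'),('z','z'),('y','y'),('k','k'),('l','l'),
   ('m','m'),('n','n'),('s','s'),('p','p'),('f','p'),
   ('r','r'),('t','t'),('q','q')]⟩

-- the single-character branch of A's loop body: c = w[i]; isLast ↔ i == n-1
-- (in the suffix representation of the loop below, i == n - 1 holds iff no
-- characters remain after c, which the caller passes as isLast); k is the
-- result of the rest of the loop (result is built by appends, ported as cons onto the tail's output)
def aStep (i : Nat) (c : Char) (isLast : Bool) (k : List Char) : List Char :=
  match PySem.Dict.get? aCONS c with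
  | some x => x :: k
  | none =>
    if c = 'i' then 'y' :: k
    else if c = 'o' ∨ c = 'u' then 'w' :: k
    else if c = 'a' then (if i = 0 then 'A' :: k else k)
    else if c = 'e' then (if isLast then 'h' :: k else k)
    else k

-- A's while loop over the suffix w[i:] (i + 1 < n ↔ at least two chars remain;
-- di = w[i:i+2] is the pair (c, c2))
def aLoop : Nat → List Char → List Char
  | _, [] => []
  | i, [c] => aStep i c true (aLoop (i + 1) [])
  | i, c :: c2 :: rest =>
    if c = 's' ∧ c2 = 'h' then 'S' :: aLoop (i + 2) rest
    else if (c = 'c' ∧ c2 = 'h') ∨ (c = 'k' ∧ c2 = 'h') then 'X' :: aLoop (i + 2) rest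
    else if (c = 't' ∧ c2 = 'z') ∨ (c = 't' ∧ c2 = 's') then 'C' :: aLoop (i + 2) rest
    else if c = 't' ∧ c2 = 'h' then 't' :: aLoop (i + 2) rest
    else if c = 'p' ∧ c2 = 'h' then 'p' :: aLoop (i + 2) rest
    else aStep i c false (aLoop (i + 1) (c2 :: rest))

def hebrew_to_consonantal (translit : String) : String :=
  let w := PySem.Chars.replace (PySem.Chars.replace (PySem.Chars.lower translit.toList) ['\''] []) ['-'] []
  String.ofList (aLoop 0 w)

-- ===== PORT B =====
-- B's module-level dicts _DI and _CONS
def bDI : PySem.Dict (List Char) Char := ⟨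
  [(['s','h'],'S'),(['c','h'],'X'),(['k','h'],'X'),(['t','z'],'C'),
   (['t','s'],'C'),(['t','h'],'t'),(['p','h'],'p')]⟩

def bCONS : PySem.Dict (List Char) Char := ⟨
  [(['b'],'b'),(['g'],'g'),(['d'],'d'),(['h'],'h'),(['v'],'b'),
   (['w'],'w'),(['z'],'z'),(['y'],'y'),(['k'],'k'),(['l'],'l'),
   (['m'],'m'),(['n'],'n'),(['s'],'s'),(['p'],'p'),(['f'],'p'),
   (['r'],'r'),(['t'],'t'),(['q'],'q')]⟩

-- the alternatives of B's regex r"sh|ch|kh|tz|ts|th|ph|." (the '.' is the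
-- one-character fallback of bTok below; re.DOTALL: '.' matches any character)
def bDigraphs : List (List Char) :=
  [['s','h'],['c','h'],['k','h'],['t','z'],['t','s'],['t','h'],['p','h']]

-- _TOK.findall(w): left-to-right, each match greedily a known digraph else one char
def bTok : List Char → List (List Char)
  | [] => []
  | [c] => [[c]]
  | c :: c2 :: rest =>
    if [c, c2] ∈ bDigraphs then [c, c2] :: bTok rest
    else [c] :: bTok (c2 :: rest)

-- B's loop body: token p.2 at token index p.1, `last` = len(toks) - 1;
-- returns the appended string (one char) or nothing
def bEmit (last : Int) (p : Int × List Char) : Option Char :=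
  match PySem.Dict.get? bDI p.2 with
  | some x => some x
  | none =>
    match PySem.Dict.get? bCONS p.2 with
    | some x => some x
    | none =>
      if p.2 = ['i'] then some 'y'
      else if p.2 = ['o'] ∨ p.2 = ['u'] then some 'w'
      else if p.2 = ['a'] ∧ p.1 = 0 then some 'A'
      else if p.2 = ['e'] ∧ p.1 = last then some 'h'
      else none

def hebrew_to_consonantal_alt (translit : String) : String :=
  let w := PySem.Chars.replace (PySem.Chars.replace (PySem.Chars.lower translit.toList) ['\''] []) ['-'] []
  let toks := bTok w
  String.ofList ((PySem.List.enumerate toks 0).filterMap (bEmit ((toks.length : Int) - 1)))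

-- ===== PRECONDITION & SPEC =====
def Spec_hebrew_to_consonantal (translit : String) (out : String) : Prop := out = hebrew_to_consonantal_alt translit
instance (translit : String) (out : String) : Decidable (Spec_hebrew_to_consonantal translit out) := by unfold Spec_hebrew_to_consonantal; infer_instance

-- ===== CLAIM (what is proved, stated in full; the proofs are below) =====
def Claim_equal_hebrew_to_consonantal : Prop := ∀ (translit : String), Dom_hebrew_to_consonantal translit → Spec_hebrew_to_consonantal translit (hebrew_to_consonantal translit)

-- ===== LEMMAS AND PROOFS =====

-- proof-side version of bEmit: first/last as booleans instead of token indices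
def bEmitB (first lastb : Bool) (t : List Char) : Option Char :=
  match PySem.Dict.get? bDI t with
  | some x => some x
  | none =>
    match PySem.Dict.get? bCONS t with
    | some x => some x
    | none =>
      if t = ['i'] then some 'y'
      else if t = ['o'] ∨ t = ['u'] then some 'w'
      else if t = ['a'] ∧ first = true then some 'A'
      else if t = ['e'] ∧ lastb = true then some 'h'
      else none

-- structural rendering of B's enumerate-filterMap loop
def render : Bool → List (List Char) → List Char
  | _, [] => []
  | first, t :: ts =>
    match bEmitB first ts.isEmpty t with
    | some x => x :: render false ts
    | none => render false ts

lemma bEmit_head (t : List Char) (ts : List (List Char)) (s : Int) :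
    bEmit (s + ((t :: ts).length : Int) - 1) (s, t) =
      bEmitB (decide (s = 0)) ts.isEmpty t := by
  unfold bEmit bEmitB
  have he : (s = s + ((t :: ts).length : Int) - 1) ↔ (ts.isEmpty = true) := by
    rw [List.isEmpty_iff, ← List.length_eq_zero_iff (l := ts)]
    simp only [List.length_cons]
    push_cast
    omega
  have ha : (s = 0) ↔ (decide (s = 0) = true) := by simp
  cases PySem.Dict.get? bDI t with
  | some x => rfl
  | none =>
    cases PySem.Dict.get? bCONS t with
    | some x => rfl
    | none =>
      simp only [← he, ← ha]

lemma enum_render (toks : List (List Char)) (s : Int) (hs : 0 ≤ s) :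
    (PySem.List.enumerate toks s).filterMap (bEmit (s + (toks.length : Int) - 1)) =
      render (decide (s = 0)) toks := by
  induction toks generalizing s with
  | nil => simp [PySem.List.enumerate_nil, render]
  | cons t ts ih =>
    rw [PySem.List.enumerate_cons]
    have hlen : s + ((t :: ts).length : Int) - 1 = (s + 1) + (ts.length : Int) - 1 := by
      simp only [List.length_cons]; push_cast; ring
    have htail := ih (s + 1) (by omega)
    have hdec : decide (s + 1 = 0) = false := by simp; omega
    rw [hdec] at htail
    simp only [List.filterMap_cons]
    rw [show render (decide (s = 0)) (t :: ts) =
          (match bEmitB (decide (s = 0)) ts.isEmpty t with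
           | some x => x :: render false ts
           | none => render false ts) from rfl]
    rw [← bEmit_head t ts s]
    cases bEmit (s + ((t :: ts).length : Int) - 1) (s, t) with
    | some x => simp only; rw [hlen, htail]
    | none => simp only; rw [hlen, htail]

lemma bDI_single (c : Char) : PySem.Dict.get? bDI [c] = none := by
  simp [bDI, PySem.Dict.get?, List.find?]

lemma bTok_ne_nil (c : Char) (cs : List Char) : bTok (c :: cs) ≠ [] := by
  cases cs with
  | nil => simp [bTok]
  | cons c2 rest => unfold bTok; split <;> simp

lemma bCONS_single (c : Char) : PySem.Dict.get? bCONS [c] = PySem.Dict.get? aCONS c := by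
  simp only [aCONS, bCONS, PySem.Dict.get?, List.find?, List.cons_beq_cons,
    (show (([] : List Char) == []) = true from rfl), Bool.and_true]
  repeat' split
  all_goals rfl

lemma aStep_emit (i : Nat) (c : Char) (lb : Bool) (k : List Char) :
    aStep i c lb k =
      (match bEmitB (decide (i = 0)) lb [c] with
       | some x => x :: k
       | none => k) := by
  unfold aStep bEmitB
  rw [bDI_single, bCONS_single]
  cases PySem.Dict.get? aCONS c with
  | some x => rfl
  | none =>
    simp only [List.cons.injEq, and_true]
    split_ifs <;> simp_all

lemma loop_render : ∀ (n : Nat) (w : List Char) (i : Nat), w.length ≤ n →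
    aLoop i w = render (decide (i = 0)) (bTok w) := by
  intro n
  induction n with
  | zero =>
    intro w i h
    have : w = [] := List.length_eq_zero_iff.mp (Nat.le_zero.mp h)
    subst this; rfl
  | succ m ih =>
    intro w i h
    match w with
    | [] => rfl
    | [c] =>
      show aStep i c true (aLoop (i + 1) []) = render (decide (i = 0)) [[c]]
      rw [show aLoop (i + 1) [] = [] from rfl]
      rw [show render (decide (i = 0)) [[c]] =
            (match bEmitB (decide (i = 0)) true [c] with
             | some x => x :: render false []
             | none => render false []) from rfl]
      rw [aStep_emit]
      cases bEmitB (decide (i = 0)) true [c] <;> rfl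
    | c :: c2 :: rest =>
      have hrest : rest.length ≤ m := by simp at h; omega
      have htail : (c2 :: rest).length ≤ m := by simp at h ⊢; omega
      have h2 : decide (i + 2 = 0) = false := by simp
      have h1 : decide (i + 1 = 0) = false := by simp
      unfold aLoop bTok
      by_cases hd : [c, c2] ∈ bDigraphs
      · fin_cases hd <;>
          simp [bDigraphs, ih rest (i + 2) hrest, render, bEmitB, bDI, PySem.Dict.get?, List.find?]
      · have hnot : ¬(c = 's' ∧ c2 = 'h') ∧ ¬((c = 'c' ∧ c2 = 'h') ∨ (c = 'k' ∧ c2 = 'h')) ∧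
            ¬((c = 't' ∧ c2 = 'z') ∨ (c = 't' ∧ c2 = 's')) ∧ ¬(c = 't' ∧ c2 = 'h') ∧
            ¬(c = 'p' ∧ c2 = 'h') := by
          simp [bDigraphs] at hd
          refine ⟨?_, ?_, ?_, ?_, ?_⟩ <;> rintro (⟨rfl, rfl⟩ | ⟨rfl, rfl⟩) <;> simp_all
        rw [if_neg hnot.1, if_neg hnot.2.1, if_neg hnot.2.2.1, if_neg hnot.2.2.2.1,
          if_neg hnot.2.2.2.2, if_neg hd]
        rw [aStep_emit, ih (c2 :: rest) (i + 1) htail, h1]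
        have hne : (bTok (c2 :: rest)).isEmpty = false := by
          simp [bTok_ne_nil]
        rw [show render (decide (i = 0)) ([c] :: bTok (c2 :: rest)) =
              (match bEmitB (decide (i = 0)) (bTok (c2 :: rest)).isEmpty [c] with
               | some x => x :: render false (bTok (c2 :: rest))
               | none => render false (bTok (c2 :: rest))) from rfl]
        rw [hne]

-- ===== VERDICT (by name: the statement is the Claim_ definition above) =====
theorem hebrew_to_consonantal_spec : Claim_equal_hebrew_to_consonantal := by
  intro translit _
  unfold Spec_hebrew_to_consonantal hebrew_to_consonantal hebrew_to_consonantal_alt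
  simp only
  set w := PySem.Chars.replace (PySem.Chars.replace (PySem.Chars.lower translit.toList) ['\''] []) ['-'] [] with hw
  congr 1
  rw [loop_render w.length w 0 (le_refl _)]
  have := enum_render (bTok w) 0 (le_refl 0)
  rw [zero_add] at this
  rw [this]
  rfl
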